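-- pv_equiv track=rewrite | github.com/rish664/pipeshub-ai | backend/python/app/modules/qna/response_prompt.py | _format_reference_data_for_response
-- ===== SOURCE A (Python) =====
-- from typing import Any, Dict, List, Tuple
--
-- def _format_reference_data_for_response(all_reference_data: List[Dict]) -> str:
--     """Format reference data for inclusion in response messages"""
--     if not all_reference_data:
--         return ""
--
--     result = "## Reference Data (from previous responses):\n"
--     spaces = [item for item in all_reference_data if item.get("type") == "confluence_space"]
--     projects = [item for item in all_reference_data if item.get("type") == "jira_project"]
--     issues = [item for item in all_reference_data if item.get("type") == "jira_issue"]
--     pages = [item for item in all_reference_data if item.get("type") == "confluence_page"]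
--     max_items = 10
--
--     if spaces:
--         result += "**Confluence Spaces**: " + ", ".join([f"{i.get('name','?')} (id={i.get('id','?')})" for i in spaces[:max_items]]) + "\n"
--     if projects:
--         result += "**Jira Projects**: " + ", ".join([f"{i.get('name','?')} (key={i.get('key','?')})" for i in projects[:max_items]]) + "\n"
--     if issues:
--         result += "**Jira Issues**: " + ", ".join([f"{i.get('key','?')}" for i in issues[:max_items]]) + "\n"
--     if pages:
--         result += "**Confluence Pages**: " + ", ".join([f"{i.get('title','?')} (id={i.get('id','?')})" for i in pages[:max_items]]) + "\n"
--     return result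
-- ===== SOURCE B (Python) =====
-- def _format_reference_data_for_response(all_reference_data):
--     """Format reference data for inclusion in response messages"""
--     if not all_reference_data:
--         return ""
--     buckets = {"confluence_space": [], "jira_project": [], "jira_issue": [], "confluence_page": []}
--     for item in all_reference_data:
--         t = item.get("type")
--         if t in buckets:
--             buckets[t].append(item)
--     sections = [
--         ("confluence_space", "**Confluence Spaces**: ", lambda i: f"{i.get('name','?')} (id={i.get('id','?')})"),
--         ("jira_project", "**Jira Projects**: ", lambda i: f"{i.get('name','?')} (key={i.get('key','?')})"),
--         ("jira_issue", "**Jira Issues**: ", lambda i: f"{i.get('key','?')}"),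
--         ("confluence_page", "**Confluence Pages**: ", lambda i: f"{i.get('title','?')} (id={i.get('id','?')})"),
--     ]
--     parts = ["## Reference Data (from previous responses):\n"]
--     for key, header, fmt in sections:
--         items = buckets[key][:10]
--         if items:
--             parts.append(header + ", ".join(fmt(i) for i in items) + "\n")
--     return "".join(parts)
-- ===== Notes on version B (the rewrite author's own statement) =====
-- stated objective: alternative
-- what changed: Replaces A's four independent filter passes and if-append chain with a single bucketing pass into a dict plus one data-driven loop over a (key, header, formatter) section table that joins the parts at the end.
import Mathlib
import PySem

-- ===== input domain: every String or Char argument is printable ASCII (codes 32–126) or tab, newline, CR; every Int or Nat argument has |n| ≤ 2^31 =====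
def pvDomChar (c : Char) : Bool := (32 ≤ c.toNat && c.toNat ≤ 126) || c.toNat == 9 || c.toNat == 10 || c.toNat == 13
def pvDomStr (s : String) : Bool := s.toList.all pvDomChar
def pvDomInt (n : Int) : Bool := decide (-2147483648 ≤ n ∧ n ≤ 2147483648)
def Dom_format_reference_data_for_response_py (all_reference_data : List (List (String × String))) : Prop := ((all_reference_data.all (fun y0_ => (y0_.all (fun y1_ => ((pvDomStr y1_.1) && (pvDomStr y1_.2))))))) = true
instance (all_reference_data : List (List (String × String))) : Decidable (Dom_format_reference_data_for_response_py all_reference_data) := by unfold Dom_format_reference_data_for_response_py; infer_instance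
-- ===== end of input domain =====

-- B replaces A's four filter passes + if-append chain by one bucketing pass and a
-- table-driven section loop (objective: alternative decomposition, same cost class).

-- item.get(k) / item.get(k, '?') on an insertion-order assoc list: first match (exact Python dict semantics)
def pvGet (d : List (String × String)) (k : String) : Option String := d.lookup k
def pvGetD (d : List (String × String)) (k dflt : String) : String := (d.lookup k).getD dflt

-- the f-string formatters, shared verbatim by both Pythons
def pvFmtSpace (i : List (String × String)) : String := pvGetD i "name" "?" ++ " (id=" ++ pvGetD i "id" "?" ++ ")"
def pvFmtProj (i : List (String × String)) : String := pvGetD i "name" "?" ++ " (key=" ++ pvGetD i "key" "?" ++ ")"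
def pvFmtIssue (i : List (String × String)) : String := pvGetD i "key" "?"
def pvFmtPage (i : List (String × String)) : String := pvGetD i "title" "?" ++ " (id=" ++ pvGetD i "id" "?" ++ ")"

-- ===== PORT A =====
def format_reference_data_for_response_py (all_reference_data : List (List (String × String))) : String :=
  if all_reference_data = [] then "" else
  let result := "## Reference Data (from previous responses):\n"
  let spaces := all_reference_data.filter (fun i => pvGet i "type" == some "confluence_space")
  let projects := all_reference_data.filter (fun i => pvGet i "type" == some "jira_project")
  let issues := all_reference_data.filter (fun i => pvGet i "type" == some "jira_issue")
  let pages := all_reference_data.filter (fun i => pvGet i "type" == some "confluence_page")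
  let max_items := 10
  let result := if spaces ≠ [] then result ++ "**Confluence Spaces**: " ++ PySem.Str.join ", " ((spaces.take max_items).map pvFmtSpace) ++ "\n" else result
  let result := if projects ≠ [] then result ++ "**Jira Projects**: " ++ PySem.Str.join ", " ((projects.take max_items).map pvFmtProj) ++ "\n" else result
  let result := if issues ≠ [] then result ++ "**Jira Issues**: " ++ PySem.Str.join ", " ((issues.take max_items).map pvFmtIssue) ++ "\n" else result
  let result := if pages ≠ [] then result ++ "**Confluence Pages**: " ++ PySem.Str.join ", " ((pages.take max_items).map pvFmtPage) ++ "\n" else result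
  result

-- ===== PORT B =====
-- buckets dict with the four fixed keys, as a 4-tuple of lists; appending preserves insertion order
def pvBStep (b : List (List (String × String)) × List (List (String × String)) × List (List (String × String)) × List (List (String × String)))
    (item : List (String × String)) :
    List (List (String × String)) × List (List (String × String)) × List (List (String × String)) × List (List (String × String)) :=
  let t := pvGet item "type"
  if t == some "confluence_space" then (b.1 ++ [item], b.2.1, b.2.2.1, b.2.2.2)
  else if t == some "jira_project" then (b.1, b.2.1 ++ [item], b.2.2.1, b.2.2.2)
  else if t == some "jira_issue" then (b.1, b.2.1, b.2.2.1 ++ [item], b.2.2.2)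
  else if t == some "confluence_page" then (b.1, b.2.1, b.2.2.1, b.2.2.2 ++ [item])
  else b

-- one entry of the section table: slice to 10, emit nothing when the slice is empty
def pvSection (header : String) (fmt : List (String × String) → String) (bucket : List (List (String × String))) : String :=
  let items := bucket.take 10
  if items = [] then "" else header ++ PySem.Str.join ", " (items.map fmt) ++ "\n"

def format_reference_data_for_response_py_alt (all_reference_data : List (List (String × String))) : String :=
  if all_reference_data = [] then "" else
  let b := all_reference_data.foldl pvBStep ([], [], [], [])
  "## Reference Data (from previous responses):\n"
    ++ pvSection "**Confluence Spaces**: " pvFmtSpace b.1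
    ++ pvSection "**Jira Projects**: " pvFmtProj b.2.1
    ++ pvSection "**Jira Issues**: " pvFmtIssue b.2.2.1
    ++ pvSection "**Confluence Pages**: " pvFmtPage b.2.2.2

-- ===== PRECONDITION & SPEC =====
def Spec_format_reference_data_for_response_py (all_reference_data : List (List (String × String))) (out : String) : Prop := out = format_reference_data_for_response_py_alt all_reference_data
instance (all_reference_data : List (List (String × String))) (out : String) : Decidable (Spec_format_reference_data_for_response_py all_reference_data out) := by unfold Spec_format_reference_data_for_response_py; infer_instance

-- ===== CLAIM (what is proved, stated in full; the proofs are below) =====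
def Claim_equal_format_reference_data_for_response_py : Prop := ∀ (all_reference_data : List (List (String × String))), Dom_format_reference_data_for_response_py all_reference_data → Spec_format_reference_data_for_response_py all_reference_data (format_reference_data_for_response_py all_reference_data)

-- ===== LEMMAS AND PROOFS =====

-- the single bucketing pass computes exactly A's four filters (appended to the accumulators)
theorem pvBucket_eq (xs : List (List (String × String)))
    (s p i g : List (List (String × String))) :
    xs.foldl pvBStep (s, p, i, g) =
      (s ++ xs.filter (fun j => pvGet j "type" == some "confluence_space"),
       p ++ xs.filter (fun j => pvGet j "type" == some "jira_project"),
       i ++ xs.filter (fun j => pvGet j "type" == some "jira_issue"),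
       g ++ xs.filter (fun j => pvGet j "type" == some "confluence_page")) := by
  induction xs generalizing s p i g with
  | nil => simp
  | cons x xs ih =>
    simp only [List.foldl_cons, List.filter_cons, pvBStep]
    split_ifs with h1 h2 h3 h4 <;>
      simp_all [List.append_assoc]

theorem pv_take10_nil {α : Type} (l : List α) : (l.take 10 = []) ↔ l = [] := by
  rw [List.take_eq_nil_iff]; simp

-- ===== VERDICT (by name: the statement is the Claim_ definition above) =====
set_option maxHeartbeats 1000000 in
theorem format_reference_data_for_response_py_spec : Claim_equal_format_reference_data_for_response_py := by
  intro xs _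
  unfold Spec_format_reference_data_for_response_py
  unfold format_reference_data_for_response_py format_reference_data_for_response_py_alt
  by_cases hx : xs = []
  · simp [hx]
  · simp only [hx, if_false]
    rw [pvBucket_eq]
    simp only [List.nil_append, pvSection, pv_take10_nil]
    by_cases h1 : xs.filter (fun i => pvGet i "type" == some "confluence_space") = [] <;>
    by_cases h2 : xs.filter (fun i => pvGet i "type" == some "jira_project") = [] <;>
    by_cases h3 : xs.filter (fun i => pvGet i "type" == some "jira_issue") = [] <;>
    by_cases h4 : xs.filter (fun i => pvGet i "type" == some "confluence_page") = [] <;>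
      (simp only [h1, h2, h3, h4, ne_eq, not_true_eq_false, not_false_eq_true, if_true,
         if_false, String.append_empty]
       try rw [← String.toList_inj]; simp [String.toList_append])
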